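-- pv_equiv track=rewrite | github.com/ryandancy/project-euler | problem124.py | gen_with_same_radical
-- ===== SOURCE A (Python) =====
-- def product(s):
--   r = 1
--   for x in s:
--     r *= x
--   return r
--
-- LIMIT = 100001 # not 100000 because we need to include 100000 in the generated numbers
--
-- def gen_with_same_radical(p):
--   # Given a list of primes factors p, generate all numbers with those same distinct prime factors less than LIMIT
--   # (i.e. all combinations of exponents on the primes factors less than LIMIT)
--   length = len(p)
--   exponents = [1] * length
--   last_incremented = length - 1
--
--   while True:
--     prod = product(p[i] ** exponents[i] for i in range(length))
--     while prod < LIMIT: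
--       yield prod
--       exponents[0] += 1
--       last_incremented = 0
--       prod = product(p[i] ** exponents[i] for i in range(length))
--
--     to_increment = last_incremented + 1
--     if to_increment >= length:
--       break
--
--     exponents[to_increment] += 1
--     for i in range(to_increment):
--       exponents[i] = 1
--     last_incremented = to_increment
-- ===== SOURCE B (Python) =====
-- LIMIT = 100001
--
-- def product(s):
--   r = 1
--   for x in s:
--     r *= x
--   return r
--
-- def gen_with_same_radical(p):
--   # Recursive generator: the highest-index prime is ranged outermost and prime 0
--   # innermost; pruning tests the minimal completion (all lower exponents = 1).
--   def rec(i, partial):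
--     if i == 0:
--       e = 1
--       while partial * p[0] ** e < LIMIT:
--         yield partial * p[0] ** e
--         e += 1
--     else:
--       e = 1
--       while partial * p[i] ** e * product(p[:i]) < LIMIT:
--         yield from rec(i - 1, partial * p[i] ** e)
--         e += 1
--   return rec(len(p) - 1, 1)
-- ===== Notes on version B (the rewrite author's own statement) =====
-- stated objective: alternative
-- what changed: A's manual odometer over an exponent vector with last_incremented carry bookkeeping is replaced by a recursive generator over the prime index (highest index outermost, prime 0 innermost) that prunes with the same minimal-completion test and yields in the same order.
import Mathlib
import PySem

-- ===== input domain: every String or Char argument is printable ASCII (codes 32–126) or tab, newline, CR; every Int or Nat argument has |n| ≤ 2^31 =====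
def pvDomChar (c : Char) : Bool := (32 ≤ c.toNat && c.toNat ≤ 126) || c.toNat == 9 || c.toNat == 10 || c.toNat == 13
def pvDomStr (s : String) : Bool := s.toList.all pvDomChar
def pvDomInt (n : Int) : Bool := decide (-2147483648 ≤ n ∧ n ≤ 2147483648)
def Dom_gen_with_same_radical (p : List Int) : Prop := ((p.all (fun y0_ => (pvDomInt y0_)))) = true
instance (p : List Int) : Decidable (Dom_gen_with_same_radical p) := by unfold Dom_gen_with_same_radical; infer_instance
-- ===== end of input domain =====

-- B replaces A's manual odometer (exponent vector + last_incremented carries) by a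
-- recursive generator over the prime index with the same pruning test; alternative
-- decomposition, same enumeration order.

-- ===== PORT A =====
def pvLIMIT : Int := 100001

-- port of the helper product()
def pv_product (s : List Int) : Int := s.foldl (fun r x => r * x) 1

-- `product(p[i] ** exponents[i] for i in range(length))`: the exponent list always
-- has length p.length during the run, so zipWith over the two lists is exact
-- (exponents stay ≥ 1, so Python's ** is integer power = `^ ·.toNat`).
def pv_powList (p e : List Int) : List Int := List.zipWith (fun a b => a ^ b.toNat) p e

-- `exponents[to_increment] += 1` then `for i in range(to_increment): exponents[i] = 1`
def pv_bumpReset (e : List Int) (t : Nat) : List Int :=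
  List.replicate t 1 ++ (match e.drop t with | [] => [] | v :: r => (v + 1) :: r)

-- A's main loop. The outer `while True` recomputes prod just like the inner
-- `while prod < LIMIT` re-check, so one loop top with the two branches in source
-- order is an exact transcription; the fuel only bounds the recursion depth and is
-- proven sufficient on Pre_.
def pv_loopA (p : List Int) : Nat → List Int → Int → List Int → List Int
  | 0, _, _, acc => acc
  | f + 1, e, last, acc =>
    let prod := pv_product (pv_powList p e)
    if prod < pvLIMIT then
      match e with
      | [] => acc ++ [prod]  -- Python yields prod, then `exponents[0] += 1` raises IndexError (p = [])
      | e0 :: erest => pv_loopA p f ((e0 + 1) :: erest) 0 (acc ++ [prod])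
    else
      if (p.length : Int) ≤ last + 1 then acc
      else pv_loopA p f (pv_bumpReset e (last + 1).toNat) (last + 1) acc

def gen_with_same_radical (p : List Int) : List Int :=
  pv_loopA p (19 ^ (p.length + 1)) (List.replicate p.length 1) ((p.length : Int) - 1) []

-- ===== PORT B =====
-- rec(i, partial): the while loop over e at prime index i; each loop gets fuel 32,
-- proven sufficient on Pre_.  p[i] is in range under Pre_, ported as getD.
def pv_recB (p : List Int) : Nat → Nat → Int → Int → List Int
  | _, 0, _, _ => []
  | 0, f + 1, q, e =>
    let t := q * (p.getD 0 0) ^ e.toNat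
    if t < pvLIMIT then t :: pv_recB p 0 f q (e + 1) else []
  | i + 1, f + 1, q, e =>
    let t := q * (p.getD (i + 1) 0) ^ e.toNat * pv_product (List.take (i + 1) p)
    if t < pvLIMIT then
      pv_recB p i 32 (q * (p.getD (i + 1) 0) ^ e.toNat) 1 ++ pv_recB p (i + 1) f q (e + 1)
    else []
  termination_by i f => (i, f)

def gen_with_same_radical_alt (p : List Int) : List Int :=
  pv_recB p (p.length - 1) 32 1 1

-- ===== PRECONDITION & SPEC =====
-- Pre_ admits nonempty lists whose entries are all ≥ 2 (the function's stated
-- domain: lists of primes) and, besides, any nonempty list whose full product is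
-- already ≥ LIMIT (A breaks immediately).  On the remaining inputs A diverges
-- (some entry in {-1,0,1}, or mixed signs keeping the product negative), except
-- for scattered small-product negative-entry lists, which are excluded with them.
def Pre_gen_with_same_radical (p : List Int) : Prop :=
  p ≠ [] ∧ (pvLIMIT ≤ pv_product p ∨ ∀ x ∈ p, 2 ≤ x)

instance (p : List Int) : Decidable (Pre_gen_with_same_radical p) := by
  unfold Pre_gen_with_same_radical; infer_instance

def pvWitness_gen_with_same_radical : List Int := [2, 3]

def Spec_gen_with_same_radical (p : List Int) (out : List Int) : Prop := out = gen_with_same_radical_alt p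
instance (p : List Int) (out : List Int) : Decidable (Spec_gen_with_same_radical p out) := by unfold Spec_gen_with_same_radical; infer_instance

-- ===== CLAIM (what is proved, stated in full; the proofs are below) =====
def Claim_equal_gen_with_same_radical : Prop := ∀ (p : List Int), Dom_gen_with_same_radical p → Pre_gen_with_same_radical p → Spec_gen_with_same_radical p (gen_with_same_radical p)

-- ===== LEMMAS AND PROOFS =====

-- B-side resumption: the output still to come when the loop at level l is at
-- exponent value v and the loops at levels l+1, … are at the exponents recorded
-- in `rest` (their partial products are recomputed from p and rest).
def pv_resume (p : List Int) : List Int → Nat → Int → List Int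
  | [], l, v => pv_recB p l 32 1 v
  | w :: rest, l, v =>
      pv_recB p l 32 (pv_product (pv_powList (p.drop (l + 1)) (w :: rest))) v
        ++ pv_resume p rest (l + 1) (w + 1)

-- encoded odometer position, digit i = exponents[i] - 1, base 19
def pv_val : List Int → Nat
  | [] => 0
  | x :: r => (x - 1).toNat + 19 * pv_val r

lemma pv_foldl_mul (a : Int) : ∀ s : List Int, s.foldl (fun r x => r * x) a = a * s.prod
  | [] => by simp
  | x :: r => by
    simp only [List.foldl, List.prod_cons, pv_foldl_mul (a * x) r]
    ring

lemma pv_product_eq_prod (s : List Int) : pv_product s = s.prod := by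
  simp [pv_product, pv_foldl_mul]

lemma pv_powList_ones : ∀ p : List Int, pv_powList p (List.replicate p.length 1) = p
  | [] => rfl
  | x :: r => by
    simp [pv_powList, List.replicate_succ] at *
    exact pv_powList_ones r

lemma pv_powList_replicate (tail : List Int) :
    ∀ (l : Nat) (p : List Int), l ≤ p.length →
      pv_powList p (List.replicate l 1 ++ tail) = p.take l ++ pv_powList (p.drop l) tail := by
  intro l
  induction l with
  | zero => intro p _; simp
  | succ l ih =>
    intro p hl
    match p with
    | [] => simp at hl
    | x :: r =>
      simp only [List.replicate_succ, List.cons_append, pv_powList, List.zipWith_cons_cons,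
        List.take_succ_cons, List.drop_succ_cons]
      have := ih r (by simpa using Nat.succ_le_succ_iff.mp hl)
      simp only [pv_powList] at this
      simp [this]

lemma one_le_list_prod : ∀ {s : List Int}, (∀ x ∈ s, 1 ≤ x) → 1 ≤ s.prod := by
  intro s
  induction s with
  | nil => simp
  | cons x r ih =>
    intro h
    simp only [List.prod_cons]
    have hx : (1:Int) ≤ x := h x (by simp)
    have hr : (1:Int) ≤ r.prod := ih (fun y hy => h y (by simp [hy]))
    nlinarith

lemma mem_powList_one_le : ∀ (ps es : List Int), (∀ x ∈ ps, (1:Int) ≤ x) →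
    ∀ y ∈ pv_powList ps es, 1 ≤ y := by
  intro ps
  induction ps with
  | nil => intro es _ y hy; simp [pv_powList] at hy
  | cons a ps ih =>
    intro es h y hy
    match es with
    | [] => simp [pv_powList] at hy
    | b :: es =>
      simp only [pv_powList, List.zipWith_cons_cons, List.mem_cons] at hy
      rcases hy with hy | hy
      · subst hy; exact one_le_pow₀ (h a (by simp))
      · exact ih es (fun x hx => h x (by simp [hx])) y hy

lemma one_le_powList_prod (ps es : List Int) (h : ∀ x ∈ ps, (1:Int) ≤ x) :
    1 ≤ (pv_powList ps es).prod :=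
  one_le_list_prod (mem_powList_one_le ps es h)

lemma exists_fst_zip : ∀ (ps es : List Int), ps.length = es.length →
    ∀ w ∈ es, ∃ b, (b, w) ∈ List.zip ps es := by
  intro ps
  induction ps with
  | nil =>
    intro es h w hw
    match es with
    | [] => simp at hw
    | _ :: _ => simp at h
  | cons x r ih =>
    intro es h w hw
    match es with
    | [] => simp at hw
    | y :: es =>
      simp only [List.mem_cons] at hw
      rcases hw with rfl | hw
      · exact ⟨x, by simp⟩
      · obtain ⟨b, hb⟩ := ih es (by simpa using h) w hw
        exact ⟨b, by simp [hb]⟩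

lemma pv_val_lt : ∀ (e : List Int), (∀ x ∈ e, (x - 1).toNat ≤ 17) →
    pv_val e < 19 ^ e.length := by
  intro e
  induction e with
  | nil => intro _; simp [pv_val]
  | cons x r ih =>
    intro h
    have hx := h x (by simp)
    have hr := ih (fun y hy => h y (by simp [hy]))
    simp only [pv_val, List.length_cons, pow_succ]
    omega

lemma pv_val_replicate (tail : List Int) :
    ∀ l : Nat, pv_val (List.replicate l 1 ++ tail) = 19 ^ l * pv_val tail := by
  intro l
  induction l with
  | zero => simp
  | succ l ih =>
    simp only [List.replicate_succ, List.cons_append, pv_val, ih, pow_succ]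
    norm_num
    ring

lemma drop_eq_getD_cons {p : List Int} {l : Nat} (h : l < p.length) :
    p.drop l = p.getD l 0 :: p.drop (l + 1) := by
  rw [List.getD_eq_getElem p 0 h]
  exact List.drop_eq_getElem_cons h

lemma prod_split (p : List Int) (l : Nat) (v : Int) (rest : List Int)
    (hlen : p.length = l + 1 + rest.length) :
    pv_product (pv_powList p (List.replicate l 1 ++ v :: rest))
      = (p.take l).prod * ((p.getD l 0) ^ v.toNat * (pv_powList (p.drop (l + 1)) rest).prod) := by
  have hl : l < p.length := by omega
  rw [pv_product_eq_prod, pv_powList_replicate (v :: rest) l p (by omega),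
    List.prod_append, drop_eq_getD_cons hl]
  simp [pv_powList]

lemma recB_fuel_zero (p : List Int) (i : Nat) (q e : Int) : pv_recB p i 0 q e = [] := by
  cases i <;> simp [pv_recB]

lemma recB_zero_succ (p : List Int) (f : Nat) (q e : Int) :
    pv_recB p 0 (f + 1) q e =
      (if q * (p.getD 0 0) ^ e.toNat < pvLIMIT
       then q * (p.getD 0 0) ^ e.toNat :: pv_recB p 0 f q (e + 1) else []) := by
  rw [pv_recB]

lemma recB_succ_succ (p : List Int) (i f : Nat) (q e : Int) :
    pv_recB p (i + 1) (f + 1) q e =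
      (if q * (p.getD (i + 1) 0) ^ e.toNat * pv_product (List.take (i + 1) p) < pvLIMIT
       then pv_recB p i 32 (q * (p.getD (i + 1) 0) ^ e.toNat) 1 ++ pv_recB p (i + 1) f q (e + 1)
       else []) := by
  rw [pv_recB]

-- the failing test once the exponent is big
lemma test_le_mid {b q low : Int} {n : Nat} (hb : 2 ≤ b) (hq : 1 ≤ q) (hlow : 1 ≤ low) :
    b ^ n ≤ q * b ^ n * low := by
  have hpos : (0:Int) ≤ b ^ n := pow_nonneg (by linarith) n
  nlinarith [mul_nonneg (mul_nonneg (by linarith : (0:Int) ≤ q - 1) hpos) (by linarith : (0:Int) ≤ low), mul_nonneg hpos (by linarith : (0:Int) ≤ low - 1)]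

lemma test_big {b q low : Int} {n : Nat} (hb : 2 ≤ b) (hq : 1 ≤ q) (hlow : 1 ≤ low)
    (hn : 17 ≤ n) : pvLIMIT ≤ q * b ^ n * low := by
  have h2 : ((2:Int)) ^ (17:Nat) ≤ 2 ^ n := pow_le_pow_right₀ (by norm_num) hn
  have hbn : ((2:Int)) ^ n ≤ b ^ n := pow_le_pow_left₀ (by norm_num) hb n
  have : (pvLIMIT:Int) ≤ b ^ n := by
    simp only [pvLIMIT]; norm_num at h2 ⊢; linarith
  linarith [test_le_mid (n := n) hb hq hlow]

-- a passing test bounds the exponent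
lemma test_pass_bound {b q low : Int} {n : Nat} (hb : 2 ≤ b) (hq : 1 ≤ q) (hlow : 1 ≤ low)
    (h : q * b ^ n * low < pvLIMIT) : n ≤ 16 := by
  by_contra hc
  exact absurd h (not_lt.mpr (test_big hb hq hlow (by omega)))

-- fuel irrelevance for B's while loops
lemma pv_recB_fuel (p : List Int) (hp : ∀ x ∈ p, 2 ≤ x) (i : Nat) (hi : i < p.length)
    (q : Int) (hq : 1 ≤ q) :
    ∀ (f f' : Nat) (v : Int), 1 ≤ v → 18 ≤ v.toNat + f → 18 ≤ v.toNat + f' →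
      pv_recB p i f q v = pv_recB p i f' q v := by
  have hb : 2 ≤ p.getD i 0 := by
    rw [List.getD_eq_getElem p 0 hi]; exact hp _ (List.getElem_mem hi)
  have hlow : ∀ j : Nat, 1 ≤ pv_product (List.take j p) := by
    intro j
    rw [pv_product_eq_prod]
    exact one_le_list_prod (fun x hx => by have := hp x (List.mem_of_mem_take hx); omega)
  have hfail : ∀ v : Int, 1 ≤ v → 17 ≤ v.toNat → ∀ g, pv_recB p i g q v = [] := by
    intro v hv h17 g
    cases g with
    | zero => exact recB_fuel_zero p i q v
    | succ g =>
      cases i with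
      | zero =>
        rw [recB_zero_succ, if_neg]
        have := test_big (n := v.toNat) hb hq (le_refl 1) h17
        rw [mul_one] at this
        exact not_lt.mpr this
      | succ i' =>
        rw [recB_succ_succ, if_neg]
        exact not_lt.mpr (test_big hb hq (hlow (i' + 1)) h17)
  intro f
  induction f with
  | zero =>
    intro f' v hv h1 h2
    rw [recB_fuel_zero, hfail v hv (by omega) f']
  | succ f ih =>
    intro f' v hv h1 h2
    cases f' with
    | zero => rw [recB_fuel_zero, hfail v hv (by omega) (f + 1)]
    | succ f' =>
      cases i with
      | zero =>
        rw [recB_zero_succ, recB_zero_succ]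
        by_cases ht : q * (p.getD 0 0) ^ v.toNat < pvLIMIT
        · rw [if_pos ht, if_pos ht]
          have ht' : q * (p.getD 0 0) ^ v.toNat * 1 < pvLIMIT := by rw [mul_one]; exact ht
          have hbnd : v.toNat ≤ 16 := test_pass_bound hb hq (le_refl 1) ht'
          congr 1
          exact ih f' (v + 1) (by linarith) (by omega) (by omega)
        · rw [if_neg ht, if_neg ht]
      | succ i' =>
        rw [recB_succ_succ, recB_succ_succ]
        by_cases ht : q * (p.getD (i' + 1) 0) ^ v.toNat * pv_product (List.take (i' + 1) p) < pvLIMIT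
        · rw [if_pos ht, if_pos ht]
          have hbnd : v.toNat ≤ 16 := test_pass_bound hb hq (hlow (i' + 1)) ht
          congr 1
          exact ih f' (v + 1) (by linarith) (by omega) (by omega)
        · rw [if_neg ht, if_neg ht]

lemma resume_eq (p : List Int) (rest : List Int) (l : Nat) (v : Int) :
    pv_resume p rest l v
      = pv_recB p l 32 (pv_product (pv_powList (p.drop (l + 1)) rest)) v
        ++ (match rest with | [] => [] | w :: r => pv_resume p r (l + 1) (w + 1)) := by
  cases rest with
  | nil => simp [pv_resume, pv_powList, pv_product]
  | cons w r => rfl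

lemma repl_shift (l : Nat) (X : List Int) :
    List.replicate (l + 1) (1:Int) ++ X = List.replicate l 1 ++ 1 :: X := by
  rw [List.replicate_succ', List.append_assoc]; rfl

-- descending through a passing test: one yielded value, level-0 loop advances
lemma pv_chain (p : List Int) (hp : ∀ x ∈ p, 2 ≤ x) :
    ∀ (l : Nat) (v : Int) (rest : List Int),
      p.length = l + 1 + rest.length → 1 ≤ v →
      (∀ q ∈ List.zip (p.drop (l + 1)) rest, 1 ≤ q.2) →
      pv_product (pv_powList p (List.replicate l 1 ++ v :: rest)) < pvLIMIT →
      pv_resume p rest l v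
        = pv_product (pv_powList p (List.replicate l 1 ++ v :: rest))
          :: (match l with
              | 0 => pv_resume p rest 0 (v + 1)
              | l' + 1 => pv_resume p (List.replicate l' 1 ++ v :: rest) 0 2) := by
  have hP : ∀ (j : Nat) (es : List Int), 1 ≤ pv_product (pv_powList (p.drop j) es) := by
    intro j es
    rw [pv_product_eq_prod]
    exact one_le_powList_prod _ es (fun x hx => by
      have := hp x (List.drop_subset j p hx); omega)
  intro l
  induction l with
  | zero =>
    intro v rest hlen hv hones hlt
    have hi0 : 0 < p.length := by omega
    have hb : 2 ≤ p.getD 0 0 := by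
      rw [List.getD_eq_getElem p 0 hi0]; exact hp _ (List.getElem_mem hi0)
    have hsplit := prod_split p 0 v rest hlen
    have hT := hP 1 rest
    rw [pv_product_eq_prod] at hT
    rw [resume_eq]
    rw [show (32:Nat) = 31 + 1 from rfl, recB_zero_succ]
    have harg : pv_product (pv_powList (p.drop 1) rest) * p.getD 0 0 ^ v.toNat
        = pv_product (pv_powList p (List.replicate 0 1 ++ v :: rest)) := by
      rw [hsplit, pv_product_eq_prod]; simp; ring
    rw [harg, if_pos hlt]
    rw [pv_recB_fuel p hp 0 hi0 _ (hP 1 rest) 31 32 (v + 1) (by linarith) (by omega) (by omega)]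
    rw [resume_eq (v := v + 1)]
    simp [List.cons_append]
  | succ l' ih =>
    intro v rest hlen hv hones hlt
    have hil : l' + 1 < p.length := by omega
    have hb : 2 ≤ p.getD (l' + 1) 0 := by
      rw [List.getD_eq_getElem p 0 hil]; exact hp _ (List.getElem_mem hil)
    have hsplit := prod_split p (l' + 1) v rest hlen
    have hdrop : p.drop (l' + 1) = p.getD (l' + 1) 0 :: p.drop (l' + 2) := drop_eq_getD_cons hil
    rw [resume_eq]
    obtain ⟨U, hU⟩ : ∃ U, (match rest with
        | [] => ([] : List Int)
        | w :: r => pv_resume p r (l' + 1 + 1) (w + 1)) = U := ⟨_, rfl⟩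
    rw [hU]
    rw [show (32:Nat) = 31 + 1 from rfl, recB_succ_succ]
    have hlowp : pv_product (List.take (l' + 1) p) = (p.take (l' + 1)).prod := pv_product_eq_prod _
    have harg : pv_product (pv_powList (p.drop (l' + 1 + 1)) rest) * p.getD (l' + 1) 0 ^ v.toNat
          * pv_product (List.take (l' + 1) p)
        = pv_product (pv_powList p (List.replicate (l' + 1) 1 ++ v :: rest)) := by
      rw [hsplit, hlowp, pv_product_eq_prod]; ring
    rw [harg, if_pos hlt]
    rw [pv_recB_fuel p hp (l' + 1) hil _ (hP (l' + 1 + 1) rest) 31 32 (v + 1)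
      (by linarith) (by omega) (by omega)]
    have hback : pv_recB p (l' + 1) 32 (pv_product (pv_powList (p.drop (l' + 1 + 1)) rest)) (v + 1)
          ++ U = pv_resume p rest (l' + 1) (v + 1) := by
      rw [resume_eq p rest (l' + 1) (v + 1), hU]
    have hargin : pv_product (pv_powList (p.drop (l' + 1)) (v :: rest))
        = pv_product (pv_powList (p.drop (l' + 1 + 1)) rest) * p.getD (l' + 1) 0 ^ v.toNat := by
      rw [hdrop]
      simp only [pv_powList, List.zipWith_cons_cons]
      rw [pv_product_eq_prod, pv_product_eq_prod, List.prod_cons]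
      rw [mul_comm]
    have hstep : pv_recB p l' 32 (pv_product (pv_powList (p.drop (l' + 1 + 1)) rest) * p.getD (l' + 1) 0 ^ v.toNat) 1
          ++ pv_resume p rest (l' + 1) (v + 1)
        = pv_resume p (v :: rest) l' 1 := by
      rw [resume_eq p (v :: rest) l' 1, hargin]
    rw [List.append_assoc, hback, hstep]
    have hones' : ∀ q ∈ List.zip (p.drop (l' + 1)) (v :: rest), 1 ≤ q.2 := by
      intro q hq
      rw [hdrop] at hq
      rcases List.mem_cons.mp hq with h | h
      · subst h; exact hv
      · exact hones q h
    have hlt' : pv_product (pv_powList p (List.replicate l' 1 ++ 1 :: v :: rest)) < pvLIMIT := by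
      rw [← repl_shift]; exact hlt
    have := ih 1 (v :: rest) (by simp; omega) (le_refl 1) hones' hlt'
    rw [this, ← repl_shift]
    cases l' with
    | zero => rfl
    | succ l'' => simp only [repl_shift]

lemma loopA_succ (p : List Int) (f : Nat) (e : List Int) (last : Int) (acc : List Int) :
    pv_loopA p (f + 1) e last acc =
      if pv_product (pv_powList p e) < pvLIMIT then
        (match e with
         | [] => acc ++ [pv_product (pv_powList p e)]
         | e0 :: erest => pv_loopA p f ((e0 + 1) :: erest) 0 (acc ++ [pv_product (pv_powList p e)]))
      else if (p.length : Int) ≤ last + 1 then acc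
      else pv_loopA p f (pv_bumpReset e (last + 1).toNat) (last + 1) acc := rfl

lemma loopA_succ_cons (p : List Int) (f : Nat) (e0 : Int) (erest : List Int) (last : Int) (acc : List Int) :
    pv_loopA p (f + 1) (e0 :: erest) last acc =
      if pv_product (pv_powList p (e0 :: erest)) < pvLIMIT then
        pv_loopA p f ((e0 + 1) :: erest) 0 (acc ++ [pv_product (pv_powList p (e0 :: erest))])
      else if (p.length : Int) ≤ last + 1 then acc
      else pv_loopA p f (pv_bumpReset (e0 :: erest) (last + 1).toNat) (last + 1) acc := rfl

-- the simulation: A's loop from a reachable state produces B's resumption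
lemma pv_main (p : List Int) (hp : ∀ x ∈ p, 2 ≤ x) :
    ∀ (f l : Nat) (v : Int) (rest acc : List Int),
      p.length = l + 1 + rest.length →
      1 ≤ v → (p.getD l 0) ^ ((v - 2).toNat) < pvLIMIT →
      (∀ q ∈ List.zip (p.drop (l + 1)) rest, 1 ≤ q.2 ∧ q.1 ^ ((q.2 - 1).toNat) < pvLIMIT) →
      19 ^ p.length ≤ f + pv_val (List.replicate l 1 ++ v :: rest) →
      pv_loopA p f (List.replicate l 1 ++ v :: rest) l acc = acc ++ pv_resume p rest l v := by
  have hP : ∀ (j : Nat) (es : List Int), 1 ≤ pv_product (pv_powList (p.drop j) es) := by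
    intro j es
    rw [pv_product_eq_prod]
    exact one_le_powList_prod _ es (fun x hx => by
      have := hp x (List.drop_subset j p hx); omega)
  have htake : ∀ j : Nat, (1:Int) ≤ (List.take j p).prod := by
    intro j
    exact one_le_list_prod (fun x hx => by have := hp x (List.mem_of_mem_take hx); omega)
  intro f
  induction f with
  | zero =>
    intro l v rest acc hlen hv hweak hcerts hfuel
    exfalso
    have hil : l < p.length := by omega
    have hb : 2 ≤ p.getD l 0 := by
      rw [List.getD_eq_getElem p 0 hil]; exact hp _ (List.getElem_mem hil)
    have hldrop : (p.drop (l + 1)).length = rest.length := by simp; omega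
    have hdig : ∀ x ∈ List.replicate l 1 ++ v :: rest, ((x:Int) - 1).toNat ≤ 17 := by
      intro x hx
      rcases List.mem_append.mp hx with hx | hx
      · have := List.eq_of_mem_replicate hx; omega
      · rcases List.mem_cons.mp hx with hxe | hx
        · subst hxe
          have := test_pass_bound (n := (x - 2).toNat) hb (le_refl 1) (le_refl 1)
            (by rw [one_mul, mul_one]; exact hweak)
          omega
        · obtain ⟨b, hbm⟩ := exists_fst_zip _ rest hldrop x hx
          obtain ⟨h1x, h2x⟩ := hcerts _ hbm
          have hbp : 2 ≤ b := by
            have := hp b (List.drop_subset (l+1) p (List.of_mem_zip hbm).1); omega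
          have := test_pass_bound (n := (x - 1).toNat) hbp (le_refl 1) (le_refl 1)
            (by rw [one_mul, mul_one]; exact h2x)
          omega
    have := pv_val_lt _ hdig
    simp only [List.length_append, List.length_replicate, List.length_cons] at this
    have : pv_val (List.replicate l 1 ++ v :: rest) < 19 ^ p.length := by
      rw [hlen]; convert this using 2; omega
    omega
  | succ f ih =>
    intro l v rest acc hlen hv hweak hcerts hfuel
    have hil : l < p.length := by omega
    have hb : 2 ≤ p.getD l 0 := by
      rw [List.getD_eq_getElem p 0 hil]; exact hp _ (List.getElem_mem hil)
    have hsplit := prod_split p l v rest hlen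
    have hT : 1 ≤ (pv_powList (p.drop (l + 1)) rest).prod := by
      have := hP (l + 1) rest; rwa [pv_product_eq_prod] at this
    have hvle : (v - 1).toNat ≤ v.toNat := by omega
    have hfac : (p.getD l 0) ^ v.toNat ≤ pv_product (pv_powList p (List.replicate l 1 ++ v :: rest)) := by
      rw [hsplit]
      have h0 : (0:Int) ≤ (p.getD l 0) ^ v.toNat := pow_nonneg (by omega) _
      calc (p.getD l 0) ^ v.toNat
          ≤ (p.getD l 0) ^ v.toNat * (pv_powList (p.drop (l + 1)) rest).prod :=
            le_mul_of_one_le_right h0 hT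
        _ ≤ _ := le_mul_of_one_le_left
            (le_trans h0 (le_mul_of_one_le_right h0 hT)) (htake l)
    have hones : ∀ q ∈ List.zip (p.drop (l + 1)) rest, 1 ≤ q.2 := fun q hq => (hcerts q hq).1
    by_cases hlt : pv_product (pv_powList p (List.replicate l 1 ++ v :: rest)) < pvLIMIT
    · -- yield branch
      have hchain := pv_chain p hp l v rest hlen hv hones hlt
      cases l with
      | zero =>
        simp only [List.replicate_zero, List.nil_append] at hchain hsplit hfac hlt ⊢
        rw [loopA_succ_cons, if_pos hlt]
        have hweak' : (p.getD 0 0) ^ ((v + 1 - 2).toNat) < pvLIMIT := by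
          have : (p.getD 0 0) ^ ((v + 1 - 2).toNat) ≤ (p.getD 0 0) ^ v.toNat :=
            pow_le_pow_right₀ (by omega) (by omega)
          calc _ ≤ (p.getD 0 0) ^ v.toNat := this
            _ ≤ _ := hfac
            _ < _ := hlt
        have hval : pv_val ((v + 1) :: rest) = pv_val (v :: rest) + 1 := by
          simp only [pv_val]; omega
        have hihres := ih 0 (v + 1) rest (acc ++ [pv_product (pv_powList p (v :: rest))])
          (by simpa using hlen) (by omega) hweak' hcerts
          (by
            simp only [List.replicate_zero, List.nil_append] at hfuel ⊢
            omega)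
        simp only [List.replicate_zero, List.nil_append, Nat.cast_zero] at hihres
        rw [hihres, hchain]
        simp
      | succ l' =>
        have hshape : List.replicate (l' + 1) (1:Int) ++ v :: rest
            = 1 :: (List.replicate l' 1 ++ v :: rest) := by
          rw [List.replicate_succ]; rfl
        rw [hshape] at hlt ⊢
        rw [loopA_succ_cons, if_pos hlt]
        -- new state: exponent 0 becomes 2, everything else as recorded
        have hlen2 : p.length = 0 + 1 + (List.replicate l' 1 ++ v :: rest).length := by
          simp; omega
        have hb0 : 2 ≤ p.getD 0 0 := by
          have h0 : 0 < p.length := by omega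
          rw [List.getD_eq_getElem p 0 h0]; exact hp _ (List.getElem_mem h0)
        have hcerts2 : ∀ q ∈ List.zip (p.drop 1) (List.replicate l' 1 ++ v :: rest),
            1 ≤ q.2 ∧ q.1 ^ ((q.2 - 1).toNat) < pvLIMIT := by
          have hdd : (p.drop 1).drop l' = p.drop (l' + 1) := by
            rw [List.drop_drop, Nat.add_comm]
          have hsp : p.drop 1 = (p.drop 1).take l' ++ p.drop (l' + 1) := by
            rw [← hdd]; exact (List.take_append_drop l' (p.drop 1)).symm
          have hlt' : ((p.drop 1).take l').length = l' := by simp; omega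
          intro q hq
          rw [hsp, List.zip_append (by rw [hlt', List.length_replicate])] at hq
          rcases List.mem_append.mp hq with hq | hq
          · have h1 : q.2 ∈ List.replicate l' (1:Int) := (List.of_mem_zip hq).2
            have := List.eq_of_mem_replicate h1
            constructor
            · omega
            · rw [this]; norm_num [pvLIMIT]
          · have hdrop : p.drop (l' + 1) = p.getD (l' + 1) 0 :: p.drop (l' + 2) :=
              drop_eq_getD_cons hil
            rw [hdrop] at hq
            rcases List.mem_cons.mp hq with rfl | hq
            · refine ⟨hv, ?_⟩
              calc (p.getD (l' + 1) 0) ^ ((v - 1).toNat)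
                  ≤ (p.getD (l' + 1) 0) ^ v.toNat := pow_le_pow_right₀ (by omega) hvle
                _ ≤ _ := by rw [hshape] at hfac; exact hfac
                _ < _ := hlt
            · exact hcerts q (by rw [show l' + 1 + 1 = l' + 2 from rfl]; exact hq)
        have hihres := ih 0 2 (List.replicate l' 1 ++ v :: rest)
          (acc ++ [pv_product (pv_powList p (1 :: (List.replicate l' 1 ++ v :: rest)))])
          hlen2 (by omega) (by simpa using (by norm_num [pvLIMIT] : (1:Int) < pvLIMIT)) hcerts2
          (by
            simp only [List.replicate_zero, List.nil_append]
            rw [hshape] at hfuel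
            simp only [pv_val] at hfuel ⊢
            omega)
        simp only [List.replicate_zero, List.nil_append, Nat.cast_zero] at hihres
        rw [show (1:Int) + 1 = 2 from rfl, hihres, hchain]
        simp [hshape]
    · -- carry branch
      cases rest with
      | nil =>
        rw [loopA_succ, if_neg hlt, if_pos (by
          have hl2 := hlen; simp at hl2; omega)]
        rw [resume_eq]
        have hrecnil : pv_recB p l 32 (pv_product (pv_powList (p.drop (l + 1)) ([]:List Int))) v = [] := by
          cases l with
          | zero =>
            rw [show (32:Nat) = 31 + 1 from rfl, recB_zero_succ, if_neg]
            intro hc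
            apply hlt
            rw [hsplit]
            simp only [pv_product, pv_powList, List.zipWith_nil_right, List.foldl_nil,
              one_mul] at hc
            simp only [pv_powList, List.zipWith_nil_right, List.prod_nil, mul_one,
              List.take_zero, one_mul]
            exact hc
          | succ l' =>
            rw [show (32:Nat) = 31 + 1 from rfl, recB_succ_succ, if_neg]
            intro hc
            apply hlt
            rw [hsplit]
            rw [pv_product_eq_prod (List.take (l' + 1) p)] at hc
            simp only [pv_product, pv_powList, List.zipWith_nil_right, List.foldl_nil,
              one_mul] at hc
            simp only [pv_powList, List.zipWith_nil_right, List.prod_nil, mul_one]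
            rw [mul_comm]
            exact hc
        rw [hrecnil]
        simp
      | cons w rest' =>
        have hlen' : p.length = l + 2 + rest'.length := by
          have := hlen; simp at this; omega
        have hw1 : 1 ≤ w := by
          have hdrop : p.drop (l + 1) = p.getD (l + 1) 0 :: p.drop (l + 2) :=
            drop_eq_getD_cons (by omega)
          exact (hcerts (p.getD (l + 1) 0, w) (by rw [hdrop]; simp)).1
        rw [loopA_succ, if_neg hlt, if_neg (by omega)]
        have htonat : ((l:Int) + 1).toNat = l + 1 := by omega
        have hbump : pv_bumpReset (List.replicate l 1 ++ v :: w :: rest') (l + 1)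
            = List.replicate (l + 1) 1 ++ (w + 1) :: rest' := by
          unfold pv_bumpReset
          have hdropE : (List.replicate l (1:Int) ++ v :: w :: rest').drop (l + 1) = w :: rest' := by
            have : List.replicate l (1:Int) ++ v :: w :: rest'
                = (List.replicate l (1:Int) ++ [v]) ++ w :: rest' := by
              rw [List.append_assoc]; rfl
            rw [this, List.drop_left' (by simp)]
          rw [hdropE]
        rw [htonat, hbump]
        have hdrop : p.drop (l + 1) = p.getD (l + 1) 0 :: p.drop (l + 2) :=
          drop_eq_getD_cons (by omega)
        have hweak2 : (p.getD (l + 1) 0) ^ ((w + 1 - 2).toNat) < pvLIMIT := by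
          have hww : (w + 1 - 2 : Int) = w - 1 := by ring
          rw [hww]
          exact (hcerts (p.getD (l + 1) 0, w) (by rw [hdrop]; simp)).2
        have hcerts2 : ∀ q ∈ List.zip (p.drop (l + 1 + 1)) rest',
            1 ≤ q.2 ∧ q.1 ^ ((q.2 - 1).toNat) < pvLIMIT := by
          intro q hq
          apply hcerts
          rw [hdrop]
          simp only [List.zip_cons_cons, List.mem_cons]
          right
          exact (by rw [show l + 1 + 1 = l + 2 from rfl] at hq; exact hq)
        have hfuel2 : 19 ^ p.length ≤ f + pv_val (List.replicate (l + 1) 1 ++ (w + 1) :: rest') := by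
          have hv17 : (v - 1).toNat ≤ 17 := by
            have := test_pass_bound (n := (v - 2).toNat) hb (le_refl 1) (le_refl 1)
              (by rw [one_mul, mul_one]; exact hweak)
            omega
          have hvold := pv_val_replicate (v :: w :: rest') l
          have hvnew := pv_val_replicate ((w + 1) :: rest') (l + 1)
          simp only [pv_val] at hvold hvnew
          have hK : 1 ≤ 19 ^ l := Nat.one_le_pow _ _ (by norm_num)
          have hpows : 19 ^ (l + 1) = 19 ^ l * 19 := pow_succ 19 l
          have hwn : w.toNat = (w - 1).toNat + 1 := by omega
          have hvn : (v - 1).toNat ≤ 17 := hv17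
          have key : pv_val (List.replicate l 1 ++ v :: w :: rest') + 1
              ≤ pv_val (List.replicate (l + 1) 1 ++ (w + 1) :: rest') := by
            have hww1 : (w + 1 - 1 : Int) = w := by ring
            rw [hvold, hvnew, hpows, hww1, hwn]
            have hMa : 19 ^ l * (v - 1).toNat ≤ 19 ^ l * 17 :=
              Nat.mul_le_mul (le_refl _) hvn
            nlinarith [hK, hMa]
          omega
        have hihres := ih (l + 1) (w + 1) rest' acc (by omega) (by omega)
          hweak2 hcerts2 hfuel2
        have hrecnil : pv_recB p l 32 (pv_product (pv_powList (p.drop (l + 1)) (w :: rest'))) v = [] := by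
          cases l with
          | zero =>
            rw [show (32:Nat) = 31 + 1 from rfl, recB_zero_succ, if_neg]
            intro hc
            apply hlt
            rw [hsplit]
            rw [pv_product_eq_prod (pv_powList (p.drop (0 + 1)) (w :: rest'))] at hc
            simp only [List.take_zero, List.prod_nil, one_mul]
            rw [mul_comm]
            exact hc
          | succ l' =>
            rw [show (32:Nat) = 31 + 1 from rfl, recB_succ_succ, if_neg]
            intro hc
            apply hlt
            rw [hsplit]
            rw [pv_product_eq_prod (pv_powList (p.drop (l' + 1 + 1)) (w :: rest')),
              pv_product_eq_prod (List.take (l' + 1) p)] at hc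
            ring_nf at hc ⊢
            linarith
        have hres_cons : pv_resume p (w :: rest') l v
            = pv_recB p l 32 (pv_product (pv_powList (p.drop (l + 1)) (w :: rest'))) v
              ++ pv_resume p rest' (l + 1) (w + 1) := rfl
        rw [show ((l:Int) + 1) = ((l + 1 : Nat) : Int) by push_cast; ring, hihres,
          hres_cons, hrecnil]
        simp

-- ===== VERDICT (by name: the statement is the Claim_ definition above) =====
lemma easy_alt_nil (p : List Int) (hne : p ≠ []) (hbig : pvLIMIT ≤ pv_product p) :
    gen_with_same_radical_alt p = [] := by
  unfold gen_with_same_radical_alt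
  match p, hne with
  | x :: xs, _ =>
    cases hxl : xs.length with
    | zero =>
      have hxs : xs = [] := List.length_eq_zero_iff.mp hxl
      subst hxs
      simp only [List.length_cons, List.length_nil, Nat.zero_add]
      rw [show (32:Nat) = 31 + 1 from rfl, recB_zero_succ, if_neg]
      simp only [List.getD_cons_zero, show ((1:Int)).toNat = 1 from rfl, pow_one]
      have : pv_product [x] = 1 * x := rfl
      rw [this] at hbig
      omega
    | succ m =>
      have hlen : (x :: xs).length - 1 = m + 1 := by simp [hxl]
      rw [hlen, show (32:Nat) = 31 + 1 from rfl, recB_succ_succ, if_neg]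
      have hmlt : m + 1 < (x :: xs).length := by simp [hxl]
      have hdrop2 : (x :: xs).drop (m + 2) = [] := by
        apply List.drop_eq_nil_of_le
        simp [hxl]
      have hsplitp : pv_product (x :: xs)
          = pv_product (List.take (m + 1) (x :: xs)) * (x :: xs).getD (m + 1) 0 := by
        rw [pv_product_eq_prod, pv_product_eq_prod]
        conv_lhs => rw [← List.take_append_drop (m + 1) (x :: xs)]
        rw [List.prod_append, drop_eq_getD_cons hmlt, hdrop2]
        simp
      rw [hsplitp] at hbig
      rw [not_lt]
      calc pvLIMIT ≤ _ := hbig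
        _ = 1 * (x :: xs).getD (m + 1) 0 ^ (1:Int).toNat * pv_product (List.take (m + 1) (x :: xs)) := by
          simp [mul_comm]
        _ ≤ _ := le_refl _

theorem gen_with_same_radical_spec : Claim_equal_gen_with_same_radical := by
  intro p _ hpre
  obtain ⟨hne, hcase⟩ := hpre
  unfold Spec_gen_with_same_radical
  rcases hcase with hbig | hpos
  · -- the full product is already ≥ LIMIT: both sides stop at once
    have hf : 19 ^ (p.length + 1) = (19 ^ (p.length + 1) - 1) + 1 := by
      have : 1 ≤ 19 ^ (p.length + 1) := Nat.one_le_pow _ _ (by norm_num)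
      omega
    unfold gen_with_same_radical
    rw [hf, loopA_succ, if_neg (by rw [pv_powList_ones]; omega),
      if_pos (by omega), easy_alt_nil p hne hbig]
  · -- all entries ≥ 2: run the simulation from the initial state
    match p, hne with
    | x :: xs, _ =>
      have hm : (x :: xs).length = xs.length + 1 := by simp
      have hrepl : List.replicate (x :: xs).length (1:Int)
          = List.replicate xs.length 1 ++ [(1:Int)] := by
        rw [hm, List.replicate_succ']
      have hcast : ((x :: xs).length : Int) - 1 = (xs.length : Int) := by
        rw [hm]; push_cast; ring
      have hmain := pv_main (x :: xs) hpos (19 ^ ((x :: xs).length + 1)) xs.length 1 [] []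
        (by simp) (le_refl 1)
        (by simp [pvLIMIT])
        (by simp)
        (le_trans (Nat.pow_le_pow_right (by norm_num) (Nat.le_succ _)) (Nat.le_add_right _ _))
      unfold gen_with_same_radical gen_with_same_radical_alt
      rw [hrepl, hcast, hmain]
      simp [pv_resume, hm]
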